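-- pv_equiv track=rewrite | github.com/xelangel69/Labs-homeworks-and-etc | Информатика/Лабораторная работа №1/prog.py | fib_to_decimal
-- ===== SOURCE A (Python) =====
-- def fib_to_decimal(fib_str: str) -> int:
--     fib = [1, 2]
--     while len(fib) < len(fib_str):
--         fib.append(fib[-1] + fib[-2])
--
--     result = 0
--     for i, digit in enumerate(reversed(fib_str)):
--         if digit == '1':
--             result += fib[i]
--     return result
-- ===== SOURCE B (Python) =====
-- def fib_to_decimal(fib_str: str) -> int:
--     # Horner-style evaluation in the Fibonacci number system, scanning
--     # LEFT-TO-RIGHT: no Fibonacci number is ever computed.  Invariant: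
--     # with m digits still unread, the value of the prefix read so far
--     # equals p*F(m) + q*F(m-1)  (F(0)=1, F(1)=2, F(-1)=1).
--     p = q = 0
--     for digit in fib_str:
--         p, q = p + q + (1 if digit == '1' else 0), p
--     return p + q
-- ===== Notes on version B (the rewrite author's own statement) =====
-- stated objective: alternative
-- what changed: Replaces A's precompute-a-Fibonacci-table-then-sum-over-the-reversed-string approach with a Horner-style left-to-right evaluation in the Fibonacci number system: two accumulators updated as p,q = p+q+digit, p, so no Fibonacci table is built and no reversed/enumerated pass is needed.
import Mathlib
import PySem

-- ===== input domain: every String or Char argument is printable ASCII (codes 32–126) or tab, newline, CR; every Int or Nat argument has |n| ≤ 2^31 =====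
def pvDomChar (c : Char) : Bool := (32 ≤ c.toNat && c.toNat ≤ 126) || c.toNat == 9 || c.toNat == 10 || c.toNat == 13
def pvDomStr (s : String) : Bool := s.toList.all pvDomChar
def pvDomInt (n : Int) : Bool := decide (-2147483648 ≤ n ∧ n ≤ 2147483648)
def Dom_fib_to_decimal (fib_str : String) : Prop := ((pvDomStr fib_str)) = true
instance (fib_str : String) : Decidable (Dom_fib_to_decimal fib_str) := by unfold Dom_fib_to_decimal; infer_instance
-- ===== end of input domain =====

-- B replaces A's Fibonacci table + reversed summation by a Horner-style left-to-right
-- evaluation in the Fibonacci number system (p,q = p+q+digit, p); no Fibonacci number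
-- is ever computed (objective: alternative).

-- ===== PORT A =====
-- the `while len(fib) < len(fib_str): fib.append(fib[-1] + fib[-2])` loop
-- (pyGetD with default 0 is exact here: the list always has length ≥ 2, so fib[-1]/fib[-2] never raise)
def fibExtend (n : Nat) (fib : List Int) : List Int :=
  if fib.length < n then
    fibExtend n (fib ++ [PySem.List.pyGetD fib (-1) 0 + PySem.List.pyGetD fib (-2) 0])
  else fib
termination_by n - fib.length

def fib_to_decimal (fib_str : String) : Int :=
  let fib := fibExtend fib_str.toList.length [1, 2]
  -- for i, digit in enumerate(reversed(fib_str)): …  (fib[i] is always in range: len(fib) ≥ len(fib_str))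
  (PySem.List.enumerate fib_str.toList.reverse 0).foldl
    (fun result p => if p.2 = '1' then result + PySem.List.pyGetD fib p.1 0 else result) 0

-- ===== PORT B =====
def fib_to_decimal_alt (fib_str : String) : Int :=
  let st := fib_str.toList.foldl
    (fun (st : Int × Int) digit =>
      (st.1 + st.2 + (if digit = '1' then 1 else 0), st.1))
    (0, 0)
  st.1 + st.2

-- ===== PRECONDITION & SPEC =====
def Spec_fib_to_decimal (fib_str : String) (out : Int) : Prop := out = fib_to_decimal_alt fib_str
instance (fib_str : String) (out : Int) : Decidable (Spec_fib_to_decimal fib_str out) := by unfold Spec_fib_to_decimal; infer_instance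

-- ===== CLAIM (what is proved, stated in full; the proofs are below) =====
def Claim_equal_fib_to_decimal : Prop := ∀ (fib_str : String), Dom_fib_to_decimal fib_str → Spec_fib_to_decimal fib_str (fib_to_decimal fib_str)

-- ===== LEMMAS AND PROOFS =====

-- the Fibonacci sequence A tabulates: F 0 = 1, F 1 = 2
def pvF : Nat → Int
  | 0 => 1
  | 1 => 2
  | (n+2) => pvF n + pvF (n+1)

-- F(n-1) with F(-1) = 1 (so that pvE (n+1) = pvF n and pvF (n+1) = pvF n + pvE n)
def pvE : Nat → Int
  | 0 => 1
  | (n+1) => pvF n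

-- the common specification: Σ pvF k over the '1' positions, counted from k
def pvSum : List Char → Nat → Int
  | [], _ => 0
  | c :: t, k => (if c = '1' then pvF k else 0) + pvSum t (k+1)

theorem fibExtend_map_range (n d : Nat) :
    ∀ m, 2 ≤ m → n ≤ m + d →
      fibExtend n ((List.range m).map pvF) = (List.range (max m n)).map pvF := by
  induction d with
  | zero =>
    intro m hm hnm
    unfold fibExtend
    have hlen : ((List.range m).map pvF).length = m := by simp
    rw [if_neg (by rw [hlen]; omega)]
    have : max m n = m := by omega
    rw [this]
  | succ d ih =>
    intro m hm hnm
    unfold fibExtend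
    have hlen : ((List.range m).map pvF).length = m := by simp
    by_cases h : m < n
    · rw [if_pos (by rw [hlen]; exact h)]
      have h1 : PySem.List.pyGetD ((List.range m).map pvF) (-1) 0 = pvF (m-1) := by
        rw [PySem.List.pyGetD_neg_ofNat _ 1 0 (by omega) (by omega)]
        simp [hlen]
      have h2 : PySem.List.pyGetD ((List.range m).map pvF) (-2) 0 = pvF (m-2) := by
        rw [PySem.List.pyGetD_neg_ofNat _ 2 0 (by omega) (by omega)]
        simp [hlen]
      have happ : (List.range m).map pvF ++ [pvF (m-1) + pvF (m-2)] = (List.range (m+1)).map pvF := by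
        rw [List.range_succ, List.map_append]
        have : pvF m = pvF (m-2) + pvF (m-1) := by
          obtain ⟨k, rfl⟩ : ∃ k, m = k + 2 := ⟨m - 2, by omega⟩
          simp [pvF]
        simp [this]; ring
      rw [h1, h2, happ, ih (m+1) (by omega) (by omega)]
      have : max (m+1) n = max m n := by omega
      rw [this]
    · rw [if_neg (by rw [hlen]; exact h)]
      have : max m n = m := by omega
      rw [this]

theorem foldA (M : Nat) (l : List Char) (k : Nat) (r : Int) (hM : k + l.length ≤ M) :
    (PySem.List.enumerate l (k : Int)).foldl
      (fun result p => if p.2 = '1' then result + PySem.List.pyGetD ((List.range M).map pvF) p.1 0 else result) r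
    = r + pvSum l k := by
  induction l generalizing k r with
  | nil => simp [PySem.List.enumerate_nil, pvSum]
  | cons c t ih =>
    rw [PySem.List.enumerate_cons]
    simp only [List.foldl_cons]
    have hk : k < M := by simp at hM; omega
    have hget : PySem.List.pyGetD ((List.range M).map pvF) (k : Int) 0 = pvF k := by
      rw [PySem.List.pyGetD_natCast]
      simp [List.getD, hk]
    have hcast : ((k : Int) + 1) = ((k + 1 : Nat) : Int) := by push_cast; ring
    rw [hcast, ih (k+1) _ (by simp only [List.length_cons] at hM; omega)]
    simp only [hget, pvSum]
    split_ifs <;> ring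

theorem pvSum_append (xs : List Char) (c : Char) (k : Nat) :
    pvSum (xs ++ [c]) k = pvSum xs k + (if c = '1' then pvF (k + xs.length) else 0) := by
  induction xs generalizing k with
  | nil => simp [pvSum]
  | cons x t ih =>
    simp only [List.cons_append, pvSum, ih (k+1), List.length_cons]
    have : k + 1 + t.length = k + (t.length + 1) := by omega
    rw [this]; ring

theorem pvF_succ_split (n : Nat) : pvF (n+1) = pvF n + pvE n := by
  cases n with
  | zero => decide
  | succ m => simp [pvF, pvE]; ring

-- the Horner invariant: with (p,q) meaning value = p·F(m)+q·F(m−1) over m remaining digits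
theorem foldB (l : List Char) (p q : Int) :
    (l.foldl (fun (st : Int × Int) digit =>
        (st.1 + st.2 + (if digit = '1' then 1 else 0), st.1)) (p, q)).1
    + (l.foldl (fun (st : Int × Int) digit =>
        (st.1 + st.2 + (if digit = '1' then 1 else 0), st.1)) (p, q)).2
    = p * pvF l.length + q * pvE l.length + pvSum l.reverse 0 := by
  induction l generalizing p q with
  | nil => simp [pvF, pvE, pvSum]
  | cons c t ih =>
    simp only [List.foldl_cons, List.reverse_cons, List.length_cons]
    rw [ih, pvSum_append, pvF_succ_split]
    have hlen : t.reverse.length = t.length := by simp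
    rw [hlen]
    simp only [Nat.zero_add]
    rw [show pvE (t.length + 1) = pvF t.length from rfl]
    split_ifs <;> ring

-- ===== VERDICT (by name: the statement is the Claim_ definition above) =====
theorem fib_to_decimal_spec : Claim_equal_fib_to_decimal := by
  intro s _
  unfold Spec_fib_to_decimal fib_to_decimal fib_to_decimal_alt
  set n := s.toList.length with hn
  have h2 : ([1, 2] : List Int) = (List.range 2).map pvF := by decide
  rw [h2, fibExtend_map_range n n 2 (le_refl 2) (by omega)]
  have hrl : s.toList.reverse.length = n := by simp [hn]
  have hA := foldA (max 2 n) s.toList.reverse 0 0 (by omega)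
  have hB := foldB s.toList 0 0
  show (PySem.List.enumerate s.toList.reverse 0).foldl
      (fun result p => if p.2 = '1' then result + PySem.List.pyGetD ((List.range (max 2 n)).map pvF) p.1 0 else result) 0
    = (s.toList.foldl (fun (st : Int × Int) d => (st.1 + st.2 + (if d = '1' then 1 else 0), st.1)) (0, 0)).1
      + (s.toList.foldl (fun (st : Int × Int) d => (st.1 + st.2 + (if d = '1' then 1 else 0), st.1)) (0, 0)).2
  rw [Nat.cast_zero] at hA
  rw [hA, hB]
  simp
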